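-- pv_equiv track=rewrite | github.com/scottyskid/advent21 | src/10.py | part_1
-- ===== SOURCE A (Python) =====
-- def part_1(corrupt_chars):
--
--     total_score = 0
--     for i in corrupt_chars:
--         if i == ')':
--             total_score += 3
--         elif i == ']':
--             total_score += 57
--         elif i == '}':
--             total_score += 1197
--         elif i == '>':
--             total_score += 25137
--
--     return total_score
-- ===== SOURCE B (Python) =====
-- SCORE = {')': 3, ']': 57, '}': 1197, '>': 25137}
--
-- def part_1(corrupt_chars):
--     # two-phase: count distinct characters first, then combine count * score
--     counts = {}
--     for c in corrupt_chars:
--         counts[c] = counts.get(c, 0) + 1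
--     return sum(cnt * SCORE.get(c, 0) for c, cnt in counts.items())
-- ===== Notes on version B (the rewrite author's own statement) =====
-- stated objective: alternative
-- what changed: Replaces the per-element branching accumulation with a two-phase count-then-combine pass: a frequency dict is built once, then the total is the sum of count*score over the distinct characters looked up in a score table.
import Mathlib
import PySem

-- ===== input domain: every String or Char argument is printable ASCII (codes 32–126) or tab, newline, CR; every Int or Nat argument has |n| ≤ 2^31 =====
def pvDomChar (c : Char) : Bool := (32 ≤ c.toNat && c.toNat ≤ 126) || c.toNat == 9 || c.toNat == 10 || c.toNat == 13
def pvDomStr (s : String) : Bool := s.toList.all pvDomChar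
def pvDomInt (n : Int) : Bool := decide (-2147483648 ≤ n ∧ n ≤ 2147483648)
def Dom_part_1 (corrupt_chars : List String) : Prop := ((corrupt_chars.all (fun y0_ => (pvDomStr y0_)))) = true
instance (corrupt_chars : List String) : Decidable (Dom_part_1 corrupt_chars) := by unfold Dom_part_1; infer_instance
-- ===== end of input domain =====

-- B replaces A's per-element branching accumulation by a count-then-combine pass
-- over the distinct characters (objective: alternative).

-- ===== PORT A =====
def part_1 (corrupt_chars : List String) : Int :=
  corrupt_chars.foldl (fun total_score i =>
    if i = ")" then total_score + 3
    else if i = "]" then total_score + 57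
    else if i = "}" then total_score + 1197
    else if i = ">" then total_score + 25137
    else total_score) 0

-- ===== PORT B =====
-- SCORE = {')': 3, ']': 57, '}': 1197, '>': 25137}
def pvSCORE : PySem.Dict String Int := PySem.Dict.mk [(")", 3), ("]", 57), ("}", 1197), (">", 25137)]

def part_1_alt (corrupt_chars : List String) : Int :=
  let counts := corrupt_chars.foldl (fun d c => d.insert c (d.getD c 0 + 1)) PySem.Dict.empty
  (counts.items.map (fun p => p.2 * pvSCORE.getD p.1 0)).sum

-- ===== PRECONDITION & SPEC =====
def Spec_part_1 (corrupt_chars : List String) (out : Int) : Prop := out = part_1_alt corrupt_chars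
instance (corrupt_chars : List String) (out : Int) : Decidable (Spec_part_1 corrupt_chars out) := by unfold Spec_part_1; infer_instance

-- ===== CLAIM (what is proved, stated in full; the proofs are below) =====
def Claim_equal_part_1 : Prop := ∀ (corrupt_chars : List String), Dom_part_1 corrupt_chars → Spec_part_1 corrupt_chars (part_1 corrupt_chars)

-- ===== LEMMAS AND PROOFS =====

-- A's if-chain as a scoring function
def pvScoreFn (i : String) : Int :=
  if i = ")" then 3 else if i = "]" then 57 else if i = "}" then 1197
  else if i = ">" then 25137 else 0

theorem pvSCORE_getD (i : String) : pvSCORE.getD i 0 = pvScoreFn i := by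
  by_cases h1 : i = ")"
  · subst h1; decide
  by_cases h2 : i = "]"
  · subst h2; decide
  by_cases h3 : i = "}"
  · subst h3; decide
  by_cases h4 : i = ">"
  · subst h4; decide
  have b1 : ((")" : String) == i) = false := by simp [Ne.symm h1]
  have b2 : (("]" : String) == i) = false := by simp [Ne.symm h2]
  have b3 : (("}" : String) == i) = false := by simp [Ne.symm h3]
  have b4 : ((">" : String) == i) = false := by simp [Ne.symm h4]
  unfold pvSCORE pvScoreFn
  simp [PySem.Dict.getD, PySem.Dict.get?, List.find?, b1, b2, b3, b4, h1, h2, h3, h4]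

theorem part_1_eq_sum (xs : List String) : part_1 xs = (xs.map pvScoreFn).sum := by
  unfold part_1
  have h : (fun (total_score : Int) (i : String) =>
      if i = ")" then total_score + 3
      else if i = "]" then total_score + 57
      else if i = "}" then total_score + 1197
      else if i = ">" then total_score + 25137
      else total_score) = fun total_score i => total_score + pvScoreFn i := by
    funext t i
    unfold pvScoreFn
    split_ifs <;> simp
  rw [h, PySem.List.foldl_add]
  simp

theorem toFinset_ofList (xs : List String) :
    (PySem.Set.ofList xs).toFinset = xs.toFinset := by
  ext a
  simp [PySem.Set.mem_ofList]

theorem part_1_alt_eq_sum (xs : List String) :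
    part_1_alt xs = (xs.map pvScoreFn).sum := by
  unfold part_1_alt
  simp only []
  rw [PySem.Dict.foldl_insert_getD_add_one_eq_counter, PySem.Dict.items_counter,
    List.map_map]
  have h : ((fun p : String × Int => p.2 * pvSCORE.getD p.1 0) ∘
      fun k => (k, (xs.count k : Int))) = fun k => (xs.count k : Int) * pvScoreFn k := by
    funext k; simp [pvSCORE_getD]
  rw [h, ← List.sum_toFinset _ (PySem.Set.nodup_ofList xs), toFinset_ofList,
    Finset.sum_list_map_count]
  simp

-- ===== VERDICT (by name: the statement is the Claim_ definition above) =====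
theorem part_1_spec : Claim_equal_part_1 := by
  intro xs _
  unfold Spec_part_1
  rw [part_1_eq_sum, part_1_alt_eq_sum]
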